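-- pv_equiv track=rewrite | github.com/extinctmule/algorithm-study | programmers-kakao/입문(좀쉬운거)/옹알이(1).py | solution
-- ===== SOURCE A (Python) =====
-- def solution(babbling):
--     answer = 0
--     # 중요: babbling에서 저 네가지는 각각 최대 한번씩만.
--     for s in babbling:
--         for w in ["aya", "ye", "woo", "ma"]:
--             if w in s:
--                 s = s.replace(w, " ")
--
--         if not s.strip():
--             answer += 1
--
--     return answer
-- ===== SOURCE B (Python) =====
-- def _ok(s):
--     i, n = 0, len(s)
--     while i < n:
--         c = s[i]
--         if c.isspace():
--             i += 1
--         elif c == 'a':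
--             if s.startswith('ya', i + 1):
--                 i += 3
--             else:
--                 return False
--         elif c == 'y':
--             if s.startswith('e', i + 1):
--                 i += 2
--             else:
--                 return False
--         elif c == 'w':
--             if s.startswith('oo', i + 1):
--                 i += 3
--             else:
--                 return False
--         elif c == 'm':
--             if s.startswith('a', i + 1):
--                 i += 2
--             else:
--                 return False
--         else:
--             return False
--     return True
--
--
-- def solution(babbling):
--     return sum(1 for s in babbling if _ok(s))
-- ===== Notes on version B (the rewrite author's own statement) =====
-- stated objective: alternative
-- what changed: A rewrites each string four times (replace each sound with a space) and then tests strip()==''; B decides acceptance in a single left-to-right scan, exploiting that the four sounds have distinct first letters, so each position deterministically matches whitespace or exactly one sound.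
import Mathlib
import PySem

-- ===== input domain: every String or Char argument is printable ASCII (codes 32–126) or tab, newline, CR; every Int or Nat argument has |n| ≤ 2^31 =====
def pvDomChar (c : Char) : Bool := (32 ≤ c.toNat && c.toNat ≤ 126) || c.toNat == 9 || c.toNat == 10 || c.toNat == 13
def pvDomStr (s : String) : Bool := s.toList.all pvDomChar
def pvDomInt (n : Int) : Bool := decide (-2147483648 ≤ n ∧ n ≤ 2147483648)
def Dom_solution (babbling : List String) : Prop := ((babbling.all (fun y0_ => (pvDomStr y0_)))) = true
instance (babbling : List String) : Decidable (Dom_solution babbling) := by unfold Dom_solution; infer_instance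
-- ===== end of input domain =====

-- B replaces A's four replace-passes-then-strip test by one left-to-right scan (the four
-- sounds have distinct first letters, so acceptance is decided by a deterministic scanner);
-- objective: alternative (a single pass instead of four rewrites; not measured faster).

-- ===== PORT A =====
def solution (babbling : List String) : Int :=
  babbling.foldl (fun answer s =>
    let s2 := ["aya", "ye", "woo", "ma"].foldl
      (fun s w => if PySem.Str.isIn w s then PySem.Str.replace s w " " else s) s
    if PySem.Str.strip s2 = "" then answer + 1 else answer) 0

-- ===== PORT B =====
-- helper for B: the while loop of _ok in Source B, as recursion consuming the same characters
def scanB : List Char → Bool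
  | [] => true
  | c :: t =>
    if PySem.Chars.isspace c then scanB t
    else if c = 'a' then (if ['y', 'a'].isPrefixOf t then scanB (t.drop 2) else false)
    else if c = 'y' then (if ['e'].isPrefixOf t then scanB (t.drop 1) else false)
    else if c = 'w' then (if ['o', 'o'].isPrefixOf t then scanB (t.drop 2) else false)
    else if c = 'm' then (if ['a'].isPrefixOf t then scanB (t.drop 1) else false)
    else false
termination_by l => l.length
decreasing_by all_goals (simp [List.length_drop]; try omega)

def solution_alt (babbling : List String) : Int :=
  babbling.foldl (fun answer s => if scanB s.toList then answer + 1 else answer) 0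

-- ===== PRECONDITION & SPEC =====
def Spec_solution (babbling : List String) (out : Int) : Prop := out = solution_alt babbling
instance (babbling : List String) (out : Int) : Decidable (Spec_solution babbling out) := by unfold Spec_solution; infer_instance

-- ===== CLAIM (what is proved, stated in full; the proofs are below) =====
def Claim_equal_solution : Prop := ∀ (babbling : List String), Dom_solution babbling → Spec_solution babbling (solution babbling)

-- ===== LEMMAS AND PROOFS =====

-- proof model of Python's replace(old, " ") (all non-overlapping occurrences, left to right)
def repW (old : List Char) : List Char → List Char
  | [] => []
  | c :: t =>
    if old.isPrefixOf (c :: t) then ' ' :: repW old (t.drop (old.length - 1))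
    else c :: repW old t
termination_by l => l.length
decreasing_by all_goals (simp [List.length_drop]; try omega)

theorem repW_nil (old : List Char) : repW old [] = [] := by simp [repW]

theorem repW_cons_pos (old : List Char) (c : Char) (t : List Char)
    (h : old.isPrefixOf (c :: t) = true) :
    repW old (c :: t) = ' ' :: repW old (t.drop (old.length - 1)) := by
  rw [repW]; simp [h]

theorem repW_cons_neg (old : List Char) (c : Char) (t : List Char)
    (h : old.isPrefixOf (c :: t) = false) :
    repW old (c :: t) = c :: repW old t := by
  rw [repW]; simp [h]

theorem repW_cons_ne (o c : Char) (os t : List Char) (h : o ≠ c) :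
    repW (o :: os) (c :: t) = c :: repW (o :: os) t := by
  apply repW_cons_neg
  simp [List.isPrefixOf, h]

theorem repW_head (old : List Char) (l : List Char) :
    (repW old l).head? = some ' ' ∨ (repW old l).head? = l.head? := by
  cases l with
  | nil => right; simp [repW_nil]
  | cons c t =>
    cases hp : old.isPrefixOf (c :: t) with
    | true => left; rw [repW_cons_pos _ _ _ hp]; rfl
    | false => right; rw [repW_cons_neg _ _ _ hp]; rfl

theorem isPrefixOf_cons_head (p : Char) (ps Y : List Char) (h : Y.head? ≠ some p) :
    ((p :: ps).isPrefixOf Y) = false := by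
  cases Y with
  | nil => simp [List.isPrefixOf]
  | cons y ys =>
    have hne : p ≠ y := by intro he; exact h (by simp [he])
    simp [List.isPrefixOf, hne]

theorem cons_prefix_step (p : Char) (ps : List Char) (x : Char) (X : List Char) :
    ((p :: ps).isPrefixOf (x :: X)) = (p == x && ps.isPrefixOf X) := rfl

theorem two_prefix_false (p q x : Char) (X : List Char) (hx : p = x)
    (h : X.head? ≠ some q) : ([p, q].isPrefixOf (x :: X)) = false := by
  subst hx
  rw [cons_prefix_step]
  simp [isPrefixOf_cons_head q [] X h]

theorem chain_head_ne (old Y : List Char) (p : Char) (hp : p ≠ ' ')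
    (h : Y.head? ≠ some p) : (repW old Y).head? ≠ some p := by
  rcases repW_head old Y with h1 | h1 <;> rw [h1]
  · intro he; injection he with he; exact hp he.symm
  · exact h

theorem prefix2_exists (p q : Char) (t : List Char) (h : [p, q].isPrefixOf t = true) :
    ∃ u, t = p :: q :: u := by
  cases t with
  | nil => simp [List.isPrefixOf] at h
  | cons d u =>
    cases u with
    | nil => simp [List.isPrefixOf] at h
    | cons e v =>
      simp [List.isPrefixOf] at h
      obtain ⟨h1, h2⟩ := h
      exact ⟨v, by rw [h1, h2]⟩

theorem head_eq_cons (p : Char) (t : List Char) (h : t.head? = some p) :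
    ∃ u, t = p :: u := by
  cases t with
  | nil => simp at h
  | cons d u => exact ⟨u, by injection h with h; rw [h]⟩

theorem go_eq_repW (old : List Char) (h : old ≠ []) :
    ∀ (fuel : Nat) (l acc : List Char), l.length ≤ fuel →
      PySem.Chars.replace.go old [' '] fuel l acc = acc.reverse ++ repW old l := by
  intro fuel
  induction fuel with
  | zero =>
    intro l acc hl
    have hnil : l = [] := List.eq_nil_of_length_eq_zero (Nat.le_zero.mp hl)
    subst hnil
    simp [PySem.Chars.replace.go, repW_nil]
  | succ n ih =>
    intro l acc hl
    cases l with
    | nil => simp [PySem.Chars.replace.go, repW_nil]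
    | cons c t =>
      obtain ⟨o, os, rfl⟩ : ∃ o os, old = o :: os := by
        cases old with
        | nil => exact absurd rfl h
        | cons o os => exact ⟨o, os, rfl⟩
      cases hp : (o :: os).isPrefixOf (c :: t) with
      | true =>
        have hlen : (List.drop (o :: os).length (c :: t)).length ≤ n := by
          simp [List.length_drop] at *
          omega
        simp only [PySem.Chars.replace.go, hp, if_true]
        rw [ih _ _ hlen]
        rw [repW_cons_pos _ _ _ hp]
        simp [List.drop_succ_cons]
      | false =>
        have hlen : t.length ≤ n := by simp at hl; omega
        simp only [PySem.Chars.replace.go, hp, Bool.false_eq_true, if_false]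
        rw [ih _ _ hlen]
        rw [repW_cons_neg _ _ _ hp]
        simp

theorem replace_eq_repW (s old : List Char) (h : old ≠ []) :
    PySem.Chars.replace s old [' '] = repW old s := by
  obtain ⟨o, os, rfl⟩ : ∃ o os, old = o :: os := by
    cases old with
    | nil => exact absurd rfl h
    | cons o os => exact ⟨o, os, rfl⟩
  rw [PySem.Chars.replace]
  simp only [List.isEmpty_cons, Bool.false_eq_true, if_false]
  rw [go_eq_repW _ h s.length s [] (le_refl _)]
  simp

theorem repW_of_not_infix (old : List Char) : ∀ l, ¬ old <:+: l → repW old l = l := by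
  intro l
  induction l with
  | nil => intro _; exact repW_nil old
  | cons c t ih =>
    intro hni
    have hp : old.isPrefixOf (c :: t) = false := by
      cases hq : old.isPrefixOf (c :: t)
      · rfl
      · exact absurd ((List.isPrefixOf_iff_prefix.mp hq).isInfix) hni
    rw [repW_cons_neg _ _ _ hp, ih (fun hi => hni (List.infix_cons hi))]

theorem blank_iff_strip_nil (l : List Char) :
    PySem.Chars.strip l = [] ↔ l.all PySem.Chars.isspace = true := by
  simp only [PySem.Chars.strip, PySem.Chars.rstrip, PySem.Chars.lstrip,
    List.reverse_eq_nil_iff, List.dropWhile_eq_nil_iff, List.mem_reverse, List.all_eq_true]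
  constructor
  · intro hd x hx
    rw [← List.takeWhile_append_dropWhile (p := PySem.Chars.isspace) (l := l)] at hx
    rcases List.mem_append.mp hx with hx' | hx'
    · exact List.mem_takeWhile_imp hx'
    · exact hd x hx'
  · intro hall x hx
    exact hall x (List.dropWhile_subset _ hx)

def chainW (l : List Char) : List Char :=
  repW ['m','a'] (repW ['w','o','o'] (repW ['y','e'] (repW ['a','y','a'] l)))

theorem sp_space : PySem.Chars.isspace ' ' = true := by decide
theorem sp_a : PySem.Chars.isspace 'a' = false := by decide
theorem sp_y : PySem.Chars.isspace 'y' = false := by decide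
theorem sp_w : PySem.Chars.isspace 'w' = false := by decide
theorem sp_m : PySem.Chars.isspace 'm' = false := by decide

theorem chainW_cons_pass (c : Char) (t : List Char) (ha : 'a' ≠ c) (hy : 'y' ≠ c)
    (hw : 'w' ≠ c) (hm : 'm' ≠ c) : chainW (c :: t) = c :: chainW t := by
  unfold chainW
  rw [repW_cons_ne _ _ _ _ ha, repW_cons_ne _ _ _ _ hy,
    repW_cons_ne _ _ _ _ hw, repW_cons_ne _ _ _ _ hm]

theorem chain_aux : ∀ (n : Nat) (l : List Char), l.length ≤ n →
    (chainW l).all PySem.Chars.isspace = scanB l := by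
  intro n
  induction n with
  | zero =>
    intro l hl
    have hnil : l = [] := List.eq_nil_of_length_eq_zero (Nat.le_zero.mp hl)
    subst hnil
    simp [chainW, repW_nil, scanB]
  | succ n ih =>
    intro l hl
    cases l with
    | nil => simp [chainW, repW_nil, scanB]
    | cons c t =>
      have hlt : t.length ≤ n := by simp at hl; omega
      by_cases hsp : PySem.Chars.isspace c = true
      · -- whitespace character: passes through all four patterns
        have hne : ∀ o : Char, PySem.Chars.isspace o = false → o ≠ c := by
          intro o ho he; rw [he, hsp] at ho; cases ho
        rw [chainW_cons_pass c t (hne 'a' sp_a) (hne 'y' sp_y) (hne 'w' sp_w) (hne 'm' sp_m),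
          List.all_cons]
        rw [show scanB (c :: t) = scanB t from by rw [scanB]; simp [hsp]]
        rw [hsp, Bool.true_and]
        exact ih t hlt
      · by_cases hca : c = 'a'
        · subst hca
          by_cases hya : ['y', 'a'].isPrefixOf t = true
          · have hch : chainW ('a' :: t) = ' ' :: chainW (t.drop 2) := by
              unfold chainW
              rw [repW_cons_pos ['a','y','a'] 'a' t (by rw [cons_prefix_step]; simp [hya])]
              rw [repW_cons_ne 'y' ' ' _ _ (by decide), repW_cons_ne 'w' ' ' _ _ (by decide),
                repW_cons_ne 'm' ' ' _ _ (by decide)]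
              simp
            rw [hch, List.all_cons,
              show scanB ('a' :: t) = scanB (t.drop 2) from by rw [scanB]; simp [hya, sp_a]]
            rw [sp_space, Bool.true_and]
            exact ih (t.drop 2) (by simp [List.length_drop]; omega)
          · have hya' : (['y', 'a'].isPrefixOf t) = false := Bool.eq_false_iff.mpr hya
            have hch : chainW ('a' :: t) = 'a' :: chainW t := by
              unfold chainW
              rw [repW_cons_neg ['a','y','a'] 'a' t (by rw [cons_prefix_step]; simp [hya'])]
              rw [repW_cons_ne 'y' 'a' _ _ (by decide), repW_cons_ne 'w' 'a' _ _ (by decide),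
                repW_cons_ne 'm' 'a' _ _ (by decide)]
            rw [hch, List.all_cons,
              show scanB ('a' :: t) = false from by rw [scanB]; simp [hya', sp_a]]
            simp [sp_a]
        · by_cases hcy : c = 'y'
          · subst hcy
            by_cases hye : t.head? = some 'e'
            · obtain ⟨u, rfl⟩ := head_eq_cons 'e' t hye
              have hch : chainW ('y' :: 'e' :: u) = ' ' :: chainW u := by
                unfold chainW
                rw [repW_cons_ne 'a' 'y' _ _ (by decide), repW_cons_ne 'a' 'e' _ _ (by decide)]
                rw [repW_cons_pos ['y','e'] 'y' _ (by rw [cons_prefix_step]; simp [List.isPrefixOf])]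
                rw [repW_cons_ne 'w' ' ' _ _ (by decide), repW_cons_ne 'm' ' ' _ _ (by decide)]
                simp
              rw [hch, List.all_cons,
                show scanB ('y' :: 'e' :: u) = scanB u from by
                  rw [scanB]; simp [List.isPrefixOf, sp_y]]
              rw [sp_space, Bool.true_and]
              exact ih u (by simp at hl; omega)
            · have hch : chainW ('y' :: t) = 'y' :: chainW t := by
                unfold chainW
                rw [repW_cons_ne 'a' 'y' _ _ (by decide)]
                rw [repW_cons_neg ['y','e'] 'y' _
                  (two_prefix_false 'y' 'e' 'y' _ rfl
                    (chain_head_ne _ _ _ (by decide) hye))]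
                rw [repW_cons_ne 'w' 'y' _ _ (by decide), repW_cons_ne 'm' 'y' _ _ (by decide)]
              rw [hch, List.all_cons,
                show scanB ('y' :: t) = false from by
                  rw [scanB]; simp [isPrefixOf_cons_head 'e' [] t hye, sp_y]]
              simp [sp_y]
          · by_cases hcw : c = 'w'
            · subst hcw
              by_cases hoo : ['o', 'o'].isPrefixOf t = true
              · obtain ⟨u, rfl⟩ := prefix2_exists 'o' 'o' t hoo
                have hch : chainW ('w' :: 'o' :: 'o' :: u) = ' ' :: chainW u := by
                  unfold chainW
                  rw [repW_cons_ne 'a' 'w' _ _ (by decide), repW_cons_ne 'a' 'o' _ _ (by decide),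
                    repW_cons_ne 'a' 'o' _ _ (by decide)]
                  rw [repW_cons_ne 'y' 'w' _ _ (by decide), repW_cons_ne 'y' 'o' _ _ (by decide),
                    repW_cons_ne 'y' 'o' _ _ (by decide)]
                  rw [repW_cons_pos ['w','o','o'] 'w' _ (by simp [List.isPrefixOf])]
                  rw [repW_cons_ne 'm' ' ' _ _ (by decide)]
                  simp
                rw [hch, List.all_cons,
                  show scanB ('w' :: 'o' :: 'o' :: u) = scanB u from by
                    rw [scanB]; simp [List.isPrefixOf, sp_w]]
                rw [sp_space, Bool.true_and]
                exact ih u (by simp at hl; omega)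
              · have hoo' : (['o', 'o'].isPrefixOf t) = false := Bool.eq_false_iff.mpr hoo
                have hYoo : (['o', 'o'].isPrefixOf
                    (repW ['y','e'] (repW ['a','y','a'] t))) = false := by
                  by_cases hth : t.head? = some 'o'
                  · obtain ⟨u, rfl⟩ := head_eq_cons 'o' t hth
                    have hu : u.head? ≠ some 'o' := by
                      intro hu
                      obtain ⟨v, rfl⟩ := head_eq_cons 'o' u hu
                      rw [show (['o','o'].isPrefixOf ('o' :: 'o' :: v)) = true from by
                        simp [List.isPrefixOf]] at hoo'
                      cases hoo'
                    rw [repW_cons_ne 'a' 'o' _ _ (by decide), repW_cons_ne 'y' 'o' _ _ (by decide)]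
                    exact two_prefix_false 'o' 'o' 'o' _ rfl
                      (chain_head_ne _ _ _ (by decide) (chain_head_ne _ _ _ (by decide) hu))
                  · exact isPrefixOf_cons_head 'o' ['o'] _
                      (chain_head_ne _ _ _ (by decide) (chain_head_ne _ _ _ (by decide) hth))
                have hch : chainW ('w' :: t) = 'w' :: chainW t := by
                  unfold chainW
                  rw [repW_cons_ne 'a' 'w' _ _ (by decide), repW_cons_ne 'y' 'w' _ _ (by decide)]
                  rw [repW_cons_neg ['w','o','o'] 'w' _ (by rw [cons_prefix_step]; simp [hYoo])]
                  rw [repW_cons_ne 'm' 'w' _ _ (by decide)]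
                rw [hch, List.all_cons,
                  show scanB ('w' :: t) = false from by rw [scanB]; simp [hoo', sp_w]]
                simp [sp_w]
            · by_cases hcm : c = 'm'
              · subst hcm
                by_cases hta : t.head? = some 'a'
                · obtain ⟨u, rfl⟩ := head_eq_cons 'a' t hta
                  by_cases hya2 : ['y', 'a'].isPrefixOf u = true
                  · obtain ⟨v, rfl⟩ := prefix2_exists 'y' 'a' u hya2
                    have hch : chainW ('m' :: 'a' :: 'y' :: 'a' :: v)
                        = 'm' :: ' ' :: chainW v := by
                      unfold chainW
                      rw [repW_cons_ne 'a' 'm' _ _ (by decide)]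
                      rw [repW_cons_pos ['a','y','a'] 'a' _ (by simp [List.isPrefixOf])]
                      rw [repW_cons_ne 'y' 'm' _ _ (by decide), repW_cons_ne 'y' ' ' _ _ (by decide)]
                      rw [repW_cons_ne 'w' 'm' _ _ (by decide), repW_cons_ne 'w' ' ' _ _ (by decide)]
                      rw [repW_cons_neg ['m','a'] 'm' _
                        (two_prefix_false 'm' 'a' 'm' _ rfl (by simp))]
                      rw [repW_cons_ne 'm' ' ' _ _ (by decide)]
                      simp
                    rw [hch, List.all_cons,
                      show scanB ('m' :: 'a' :: 'y' :: 'a' :: v) = false from by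
                        simp [scanB, List.isPrefixOf, sp_m, sp_y]]
                    simp [sp_m]
                  · have hya2' : (['y', 'a'].isPrefixOf u) = false := Bool.eq_false_iff.mpr hya2
                    have hch : chainW ('m' :: 'a' :: u) = ' ' :: chainW u := by
                      unfold chainW
                      rw [repW_cons_ne 'a' 'm' _ _ (by decide)]
                      rw [repW_cons_neg ['a','y','a'] 'a' _ (by rw [cons_prefix_step]; simp [hya2'])]
                      rw [repW_cons_ne 'y' 'm' _ _ (by decide), repW_cons_ne 'y' 'a' _ _ (by decide)]
                      rw [repW_cons_ne 'w' 'm' _ _ (by decide), repW_cons_ne 'w' 'a' _ _ (by decide)]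
                      rw [repW_cons_pos ['m','a'] 'm' _ (by simp [List.isPrefixOf])]
                      simp
                    rw [hch, List.all_cons,
                      show scanB ('m' :: 'a' :: u) = scanB u from by
                        rw [scanB]; simp [List.isPrefixOf, sp_m]]
                    rw [sp_space, Bool.true_and]
                    exact ih u (by simp at hl; omega)
                · have hch : chainW ('m' :: t) = 'm' :: chainW t := by
                    unfold chainW
                    rw [repW_cons_ne 'a' 'm' _ _ (by decide), repW_cons_ne 'y' 'm' _ _ (by decide),
                      repW_cons_ne 'w' 'm' _ _ (by decide)]
                    rw [repW_cons_neg ['m','a'] 'm' _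
                      (two_prefix_false 'm' 'a' 'm' _ rfl
                        (chain_head_ne _ _ _ (by decide)
                          (chain_head_ne _ _ _ (by decide)
                            (chain_head_ne _ _ _ (by decide) hta))))]
                  rw [hch, List.all_cons,
                    show scanB ('m' :: t) = false from by
                      rw [scanB]; simp [isPrefixOf_cons_head 'a' [] t hta, sp_m]]
                  simp [sp_m]
              · have hspf : PySem.Chars.isspace c = false := Bool.eq_false_iff.mpr hsp
                rw [chainW_cons_pass c t (fun he => hca he.symm) (fun he => hcy he.symm)
                  (fun he => hcw he.symm) (fun he => hcm he.symm), List.all_cons]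
                rw [show scanB (c :: t) = false from by
                  rw [scanB]; simp [hspf, hca, hcy, hcw, hcm]]
                simp [hspf]

theorem chain_eq_scanB (l : List Char) :
    (chainW l).all PySem.Chars.isspace = scanB l :=
  chain_aux l.length l (le_refl _)

theorem step_toList (x w : String) (hw : w.toList ≠ []) :
    (if PySem.Str.isIn w x then PySem.Str.replace x w " " else x).toList
      = repW w.toList x.toList := by
  by_cases hi : PySem.Str.isIn w x = true
  · rw [if_pos hi, PySem.Str.toList_replace]
    exact replace_eq_repW _ _ hw
  · rw [if_neg hi]
    rw [repW_of_not_infix _ _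
      ((PySem.Chars.isIn_eq_false_iff _ _).mp (by simpa [PySem.Str.isIn] using hi))]

theorem checkA_eq_scanB (s : String) :
    (PySem.Str.strip (["aya", "ye", "woo", "ma"].foldl
        (fun s w => if PySem.Str.isIn w s then PySem.Str.replace s w " " else s) s) = "")
      ↔ scanB s.toList = true := by
  simp only [List.foldl_cons, List.foldl_nil]
  constructor
  · intro h
    have h' := congrArg String.toList h
    rw [PySem.Str.toList_strip] at h'
    rw [step_toList _ "ma" (by decide), step_toList _ "woo" (by decide),
      step_toList _ "ye" (by decide), step_toList _ "aya" (by decide)] at h'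
    have hb := (blank_iff_strip_nil _).mp h'
    rw [show (repW "ma".toList (repW "woo".toList (repW "ye".toList (repW "aya".toList s.toList))))
        = chainW s.toList from rfl, chain_eq_scanB] at hb
    exact hb
  · intro h
    apply String.toList_inj.mp
    rw [PySem.Str.toList_strip]
    rw [step_toList _ "ma" (by decide), step_toList _ "woo" (by decide),
      step_toList _ "ye" (by decide), step_toList _ "aya" (by decide)]
    exact (blank_iff_strip_nil _).mpr (by
      rw [show (repW "ma".toList (repW "woo".toList (repW "ye".toList (repW "aya".toList s.toList))))
          = chainW s.toList from rfl, chain_eq_scanB]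
      exact h)

-- ===== VERDICT (by name: the statement is the Claim_ definition above) =====
theorem solution_spec : Claim_equal_solution := by
  intro babbling _
  unfold Spec_solution solution solution_alt
  have hfun : (fun (answer : Int) (s : String) =>
      let s2 := ["aya", "ye", "woo", "ma"].foldl
        (fun s w => if PySem.Str.isIn w s then PySem.Str.replace s w " " else s) s
      if PySem.Str.strip s2 = "" then answer + 1 else answer)
      = (fun (answer : Int) (s : String) => if scanB s.toList then answer + 1 else answer) := by
    funext answer s
    by_cases h : scanB s.toList = true
    · rw [if_pos ((checkA_eq_scanB s).mpr h), h]
      simp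
    · have h' : scanB s.toList = false := Bool.eq_false_iff.mpr h
      rw [if_neg (fun hc => h ((checkA_eq_scanB s).mp hc)), h']
      simp
  rw [hfun]
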